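-- pv_equiv track=rewrite | github.com/CharlesDdev/genAI-coding-questions | grok-lvl2-ex4.py | ends_same
-- ===== SOURCE A (Python) =====
-- def ends_same(word1, word2):
--     last1 = ""
--     last2 = ""
--     for char in word1:
--         last1 = char
--     for char in word2:
--         last2 = char
--     if last1 == last2:
--         return True
--     else:
--         return False
-- ===== SOURCE B (Python) =====
-- def ends_same(word1, word2):
--     return word1[-1:] == word2[-1:]
-- ===== Notes on version B (the rewrite author's own statement) =====
-- stated objective: faster
-- what changed: Replaces the two full scans that keep overwriting a 'last char' variable with direct O(1) negative slicing word[-1:] (empty string for empty input) compared in one expression.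
import Mathlib
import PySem

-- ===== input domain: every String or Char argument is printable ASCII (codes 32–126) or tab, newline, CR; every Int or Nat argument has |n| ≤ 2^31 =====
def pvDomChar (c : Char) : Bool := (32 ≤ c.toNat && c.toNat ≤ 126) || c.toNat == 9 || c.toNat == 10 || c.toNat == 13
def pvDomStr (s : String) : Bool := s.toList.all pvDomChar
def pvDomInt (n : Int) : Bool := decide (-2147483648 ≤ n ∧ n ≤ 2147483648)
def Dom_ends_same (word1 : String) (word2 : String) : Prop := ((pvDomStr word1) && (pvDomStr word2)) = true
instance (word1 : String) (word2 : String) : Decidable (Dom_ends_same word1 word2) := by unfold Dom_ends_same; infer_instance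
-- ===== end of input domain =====

-- B: compare the word[-1:] slices directly instead of scanning both strings; proved equal to A. (idiomatic)
-- ===== PORT A =====
-- A scans each word, overwriting last1/last2 with each char; last1 starts as "" ([] on code points),
-- then holds the 1-char string [c]. Strings are handled on code points (List Char), exact for ASCII and beyond.
def ends_same (word1 : String) (word2 : String) : Bool :=
  let last1 := word1.toList.foldl (fun _ c => [c]) ([] : List Char)
  let last2 := word2.toList.foldl (fun _ c => [c]) ([] : List Char)
  if last1 == last2 then true else false

-- ===== PORT B =====
-- word1[-1:] == word2[-1:], slices on code points
def ends_same_alt (word1 : String) (word2 : String) : Bool :=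
  PySem.Chars.slice word1.toList (some (-1)) none == PySem.Chars.slice word2.toList (some (-1)) none

-- ===== PRECONDITION & SPEC =====
def Spec_ends_same (word1 : String) (word2 : String) (out : Bool) : Prop := out = ends_same_alt word1 word2
instance (word1 : String) (word2 : String) (out : Bool) : Decidable (Spec_ends_same word1 word2 out) := by unfold Spec_ends_same; infer_instance

-- ===== CLAIM (what is proved, stated in full; the proofs are below) =====
def Claim_equal_ends_same : Prop := ∀ (word1 : String) (word2 : String), Dom_ends_same word1 word2 → Spec_ends_same word1 word2 (ends_same word1 word2)

-- ===== LEMMAS AND PROOFS =====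

-- the foldl keeps only the last char: it equals drop (len-1)
theorem foldl_last_aux (l : List Char) (init : List Char) :
    l.foldl (fun _ c => [c]) init = l.drop (l.length - 1) ∨
      (l = [] ∧ l.foldl (fun _ c => [c]) init = init) := by
  induction l generalizing init with
  | nil => exact Or.inr ⟨rfl, rfl⟩
  | cons c cs ih =>
    left
    rcases ih [c] with h | ⟨hnil, h⟩
    · simp only [List.foldl_cons, h]
      cases cs with
      | nil => simp at h ⊢
      | cons d ds => simp [List.length_cons]
    · subst hnil; simpa using h

theorem foldl_last (l : List Char) :
    l.foldl (fun _ c => [c]) ([] : List Char) = l.drop (l.length - 1) := by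
  rcases foldl_last_aux l [] with h | ⟨hn, h⟩
  · exact h
  · subst hn; simpa using h

theorem slice_last (l : List Char) :
    PySem.Chars.slice l (some (-1)) none = l.drop (l.length - 1) := by
  simp [PySem.List.slice_from_neg_one]

-- ===== VERDICT (by name: the statement is the Claim_ definition above) =====
theorem ends_same_spec : Claim_equal_ends_same := by
  intro w1 w2 _
  unfold Spec_ends_same ends_same ends_same_alt
  simp only [slice_last, foldl_last]
  split <;> simp_all
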